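-- pv_equiv track=rewrite | github.com/Thomas-Lohith/slr-kit | preprocess.py | replace_ngram
-- ===== SOURCE A (Python) =====
-- def replace_ngram(text, n_grams, check_subsequent):
--     """
--     Replace the given n-grams with a placeholder in the specified text
--
--     The n-grams and their placeholder are taken from the generator n_grams, that
--     must be a generator that yields a tuple (placeholder, n-gram). Each n-gram
--     must be a tuple of strings.
--     The function can also check if the toke immediately after the replaced
--     n-gram is equal to the placeholder to remove it. This is useful for acronyms
--     because, usually the abbreviation immediately follows the extended acronym.
--
--     :param text: the text to search
--     :type text: list[str]
--     :param n_grams: generator that yields n-grams and their placeholder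
--     :type n_grams: Generator[tuple[str, tuple[str]], Any, None]
--     :param check_subsequent: if True, check the token immediately after the
--         found n-gram. If it is equal to the placeholder, this token is removed.
--     :return: the transformed text
--     :rtype: list[str]
--     """
--     text2 = list(text)
--     for placeholder, ngram in n_grams:
--         end = False
--         index = -1
--         length = len(ngram)
--         while not end:
--             try:
--                 # index + 1 to skip the previous match
--                 index = text2.index(ngram[0], index + 1)
--                 if tuple(text2[index:index + length]) == ngram:
--                     # found!
--                     text2[index:index + length] = [placeholder]
--                     try:
--                         if check_subsequent and text2[index + 1] == placeholder:
--                             del text2[index + 1]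
--                     except IndexError:
--                         # reached the end of the list: stop the loop
--                         end = True
--             except ValueError:
--                 end = True
--
--     return text2
-- ===== SOURCE B (Python) =====
-- def replace_ngram(text, n_grams, check_subsequent):
--     text2 = list(text)
--     for placeholder, ngram in n_grams:
--         first = ngram[0]
--         length = len(ngram)
--         target = list(ngram)
--         n = len(text2)
--         result = []
--         i = 0
--         while True:
--             try:
--                 j = text2.index(first, i)
--             except ValueError:
--                 result.extend(text2[i:])
--                 break
--             result.extend(text2[i:j])
--             if text2[j:j + length] == target:
--                 result.append(placeholder)
--                 i = j + length
--                 if check_subsequent and i < n and text2[i] == placeholder: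
--                     i += 1
--             else:
--                 result.append(first)
--                 i = j + 1
--         text2 = result
--     return text2
-- ===== Notes on version B (the rewrite author's own statement) =====
-- stated objective: alternative
-- what changed: Replaces the in-place splice/del while-loop with a pass that jumps between occurrences of the first token via .index and rebuilds a fresh list, appending the placeholder (and skipping one subsequent placeholder) instead of splicing; measured cost is comparable on the generated inputs (scanning dominates), so no speed is claimed.
import Mathlib
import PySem

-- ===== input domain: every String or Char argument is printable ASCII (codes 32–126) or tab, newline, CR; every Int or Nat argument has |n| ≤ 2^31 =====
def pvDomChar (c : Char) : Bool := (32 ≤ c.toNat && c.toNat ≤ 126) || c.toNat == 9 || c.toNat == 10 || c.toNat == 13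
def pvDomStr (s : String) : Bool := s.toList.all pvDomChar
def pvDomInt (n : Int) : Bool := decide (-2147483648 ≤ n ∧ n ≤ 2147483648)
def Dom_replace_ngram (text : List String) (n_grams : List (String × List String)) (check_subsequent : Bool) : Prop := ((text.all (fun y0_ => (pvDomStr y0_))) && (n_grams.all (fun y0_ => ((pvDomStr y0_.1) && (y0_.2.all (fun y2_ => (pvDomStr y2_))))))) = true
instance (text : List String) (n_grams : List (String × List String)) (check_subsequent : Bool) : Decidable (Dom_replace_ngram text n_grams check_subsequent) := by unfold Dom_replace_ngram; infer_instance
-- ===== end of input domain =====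

-- B rebuilds a fresh list per n-gram pass instead of A's in-place splices/deletes (alternative decomposition; the equivalence is about the return value only, A does not mutate its arguments).

-- ===== PORT A =====
-- Inner while-loop of A. State: current list t2 and `start` = index + 1 (always ≥ 0 in A,
-- since index starts at -1 and is only ever set to a found, nonnegative, position).
-- text2.index(first, start) is ported exactly as PySem.List.index? on t2.drop start, offset by
-- start (first occurrence at position ≥ start; none = ValueError).
-- Slices/del with the nonnegative in-range bounds of A are exact as take/drop
-- (PySem.List.slice_natCast). Fuel only makes the loop total: each iteration strictly increases
-- `start` while t2 never grows, so t2.length + 1 steps always suffice.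
def pvALoop (ph first : String) (ngram : List String) (cs : Bool) :
    Nat → List String → Nat → List String
  | 0, t2, _ => t2
  | fuel + 1, t2, start =>
    match PySem.List.index? (t2.drop start) first with
    | none => t2                                         -- ValueError: end = True
    | some j =>
      let idx := start + j                               -- index = text2.index(ngram[0], index + 1)
      if (t2.drop idx).take ngram.length = ngram then    -- tuple(text2[index:index+length]) == ngram
        let t2' := t2.take idx ++ ph :: t2.drop (idx + ngram.length)  -- text2[index:index+length] = [placeholder]
        if cs then
          match t2'[idx + 1]? with
          | none => t2'                                  -- IndexError: end = True
          | some y =>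
            if y = ph then
              pvALoop ph first ngram cs fuel (t2'.take (idx + 1) ++ t2'.drop (idx + 2)) (idx + 1)  -- del text2[index+1]
            else pvALoop ph first ngram cs fuel t2' (idx + 1)
        else pvALoop ph first ngram cs fuel t2' (idx + 1)
      else pvALoop ph first ngram cs fuel t2 (idx + 1)

def replace_ngram (text : List String) (n_grams : List (String × List String)) (check_subsequent : Bool) : List String :=
  n_grams.foldl
    (fun t2 pn =>
      match pn.2 with
      | [] => t2            -- ngram[0] raises IndexError in Python; excluded by Pre_
      | first :: _ => pvALoop pn.1 first pn.2 check_subsequent (t2.length + 1) t2 0)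
    text

-- ===== PORT B =====
-- B's while-True loop: jump to the next occurrence of `first` with text2.index(first, i)
-- (ported as PySem.List.index? on t2.drop i, offset by i; none = ValueError -> copy the tail
-- and stop), copy the untouched span text2[i:j], then either emit the placeholder (skipping the
-- matched tokens and, with check_subsequent, one immediately following placeholder) or emit the
-- single token. Slices with the nonnegative in-range bounds used here are exact as take/drop;
-- t2.getD i' "" = text2[i'], exact since the read is guarded by i' < n.
def pvBLoop (ph first : String) (rest : List String) (cs : Bool) (t2 : List String) (n : Nat) :
    Nat → List String → List String
  | i, acc =>
    match h : PySem.List.index? (t2.drop i) first with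
    | none => acc ++ t2.drop i                              -- result.extend(text2[i:]); break
    | some k =>
      let j := i + k                                        -- j = text2.index(first, i)
      let acc' := acc ++ (t2.drop i).take k                 -- result.extend(text2[i:j])
      if (t2.drop j).take (rest.length + 1) = first :: rest then   -- text2[j:j+length] == target
        let i' := j + (rest.length + 1)
        if cs ∧ i' < n ∧ t2.getD i' "" = ph then
          pvBLoop ph first rest cs t2 n (i' + 1) (acc' ++ [ph])
        else
          pvBLoop ph first rest cs t2 n i' (acc' ++ [ph])
      else pvBLoop ph first rest cs t2 n (j + 1) (acc' ++ [first])
  termination_by i _ => t2.length - i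
  decreasing_by
  all_goals
  · obtain ⟨pre, suf, he, hl, -⟩ := (PySem.List.index?_eq_some_iff _ _ _).mp h
    have hk : k < (t2.drop i).length := by rw [he]; simp [← hl]
    simp only [List.length_drop] at hk
    omega

def replace_ngram_alt (text : List String) (n_grams : List (String × List String)) (check_subsequent : Bool) : List String :=
  n_grams.foldl
    (fun t2 pn =>
      match pn.2 with
      | [] => t2            -- first = ngram[0] raises IndexError in Python; excluded by Pre_
      | first :: rest => pvBLoop pn.1 first rest check_subsequent t2 t2.length 0 [])
    text

-- ===== PRECONDITION & SPEC =====
-- Pre_ excludes exactly the inputs where some n-gram is empty: there both A and B raise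
-- IndexError on ngram[0].
def Pre_replace_ngram (text : List String) (n_grams : List (String × List String)) (check_subsequent : Bool) : Prop :=
  ∀ p ∈ n_grams, p.2 ≠ []
instance (text : List String) (n_grams : List (String × List String)) (check_subsequent : Bool) : Decidable (Pre_replace_ngram text n_grams check_subsequent) := by unfold Pre_replace_ngram; infer_instance

def pvWitness_replace_ngram : List String × (List (String × List String)) × Bool :=
  (["a", "b", "P", "c"], [("P", ["a", "b"])], true)

def Spec_replace_ngram (text : List String) (n_grams : List (String × List String)) (check_subsequent : Bool) (out : List String) : Prop := out = replace_ngram_alt text n_grams check_subsequent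
instance (text : List String) (n_grams : List (String × List String)) (check_subsequent : Bool) (out : List String) : Decidable (Spec_replace_ngram text n_grams check_subsequent out) := by unfold Spec_replace_ngram; infer_instance

-- ===== CLAIM (what is proved, stated in full; the proofs are below) =====
def Claim_equal_replace_ngram : Prop := ∀ (text : List String) (n_grams : List (String × List String)) (check_subsequent : Bool), Dom_replace_ngram text n_grams check_subsequent → Pre_replace_ngram text n_grams check_subsequent → Spec_replace_ngram text n_grams check_subsequent (replace_ngram text n_grams check_subsequent)

-- ===== LEMMAS AND PROOFS =====

-- Canonical per-n-gram rebuild, used only in the proofs.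
def pvSkip (ph : String) (cs : Bool) : List String → List String
  | [] => []
  | y :: t => if cs ∧ y = ph then t else y :: t

theorem pvSkip_length_le (ph : String) (cs : Bool) (ys : List String) :
    (pvSkip ph cs ys).length ≤ ys.length := by
  cases ys with
  | nil => simp [pvSkip]
  | cons y t => simp only [pvSkip]; split <;> simp

def pvRb (ph first : String) (rest : List String) (cs : Bool) : List String → List String
  | [] => []
  | x :: xs =>
    if (x :: xs).take (rest.length + 1) = first :: rest then
      ph :: pvRb ph first rest cs (pvSkip ph cs (xs.drop rest.length))
    else x :: pvRb ph first rest cs xs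
  termination_by l => l.length
  decreasing_by
  · have h1 := pvSkip_length_le ph cs (xs.drop rest.length)
    have h2 : (xs.drop rest.length).length ≤ xs.length := by simp
    simp only [List.length_cons]; omega
  · simp

theorem pvRb_nil (ph first : String) (rest : List String) (cs : Bool) :
    pvRb ph first rest cs [] = [] := by simp [pvRb]

theorem pvRb_cons (ph first : String) (rest : List String) (cs : Bool) (x : String) (xs : List String) :
    pvRb ph first rest cs (x :: xs) =
      if (x :: xs).take (rest.length + 1) = first :: rest then
        ph :: pvRb ph first rest cs (pvSkip ph cs (xs.drop rest.length))
      else x :: pvRb ph first rest cs xs := by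
  rw [pvRb]

-- no occurrence of `first` ⇒ rebuild is the identity
theorem pvRb_of_not_mem (ph first : String) (rest : List String) (cs : Bool)
    (s : List String) (h : first ∉ s) : pvRb ph first rest cs s = s := by
  induction s with
  | nil => simp [pvRb]
  | cons x xs ih =>
    rw [pvRb_cons]
    have hx : x ≠ first := by intro e; exact h (e ▸ List.mem_cons_self)
    have : ¬ (x :: xs).take (rest.length + 1) = first :: rest := by
      simp only [List.take_succ_cons]; intro e; exact hx (List.cons_eq_cons.mp e).1
    rw [if_neg this, ih (fun m => h (List.mem_cons_of_mem _ m))]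

-- rebuild passes over a first-free prefix
theorem pvRb_append_of_not_mem (ph first : String) (rest : List String) (cs : Bool)
    (u s : List String) (h : first ∉ u) :
    pvRb ph first rest cs (u ++ s) = u ++ pvRb ph first rest cs s := by
  induction u with
  | nil => simp
  | cons x xs ih =>
    have hx : x ≠ first := by intro e; exact h (e ▸ List.mem_cons_self)
    rw [List.cons_append, pvRb_cons]
    have : ¬ (x :: (xs ++ s)).take (rest.length + 1) = first :: rest := by
      simp only [List.take_succ_cons]; intro e; exact hx (List.cons_eq_cons.mp e).1
    rw [if_neg this, ih (fun m => h (List.mem_cons_of_mem _ m))]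
    simp

theorem pvSkip_false (ph : String) (w : List String) : pvSkip ph false w = w := by
  cases w <;> simp [pvSkip]

theorem pvRb_match (ph first : String) (rest : List String) (cs : Bool) (w : List String) :
    pvRb ph first rest cs ((first :: rest) ++ w) = ph :: pvRb ph first rest cs (pvSkip ph cs w) := by
  rw [show ((first :: rest) ++ w) = first :: (rest ++ w) by simp, pvRb_cons]
  have ht : (first :: (rest ++ w)).take (rest.length + 1) = first :: rest := by
    simp
  rw [if_pos ht, List.drop_left]

-- B's loop computes the canonical rebuild of the remaining suffix
theorem pvBLoop_eq (ph first : String) (rest : List String) (cs : Bool) (t2 : List String) :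
    ∀ m i acc, t2.length - i ≤ m →
      pvBLoop ph first rest cs t2 t2.length i acc = acc ++ pvRb ph first rest cs (t2.drop i) := by
  intro m
  induction m with
  | zero =>
    intro i acc hm
    have hnil : t2.drop i = [] := List.drop_eq_nil_of_le (by omega)
    rw [pvBLoop]
    cases hidx : PySem.List.index? (t2.drop i) first with
    | none => rw [hnil, pvRb_nil]
    | some k =>
      exfalso
      obtain ⟨u, v, huv, -, -⟩ := (PySem.List.index?_eq_some_iff _ _ _).mp hidx
      rw [hnil] at huv
      exact absurd huv (by simp)
  | succ m ih =>
    intro i acc hm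
    rw [pvBLoop]
    cases hidx : PySem.List.index? (t2.drop i) first with
    | none =>
      have : first ∉ t2.drop i := (PySem.List.index?_eq_none_iff _ _).mp hidx
      rw [pvRb_of_not_mem _ _ _ _ _ this]
    | some k =>
      obtain ⟨u, v, huv, hul, hu⟩ := (PySem.List.index?_eq_some_iff _ _ _).mp hidx
      have hlen : (t2.drop i).length = t2.length - i := by simp
      have hiv : u.length + 1 + v.length = t2.length - i := by
        have := congrArg List.length huv
        simp at this; omega
      have htk : (t2.drop i).take k = u := by
        rw [huv, ← hul, List.take_left]
      have hdj : t2.drop (i + k) = first :: v := by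
        rw [← List.drop_drop, huv, ← hul, List.drop_left]
      simp only [htk, hdj]
      by_cases hmm : v.take rest.length = rest
      · have hmt : (first :: v).take (rest.length + 1) = first :: rest := by simp [hmm]
        rw [if_pos hmt]
        have hrl : rest.length ≤ v.length := by
          have := congrArg List.length hmm; simp at this; omega
        obtain ⟨w, hw⟩ : ∃ w, w = v.drop rest.length := ⟨_, rfl⟩
        have hv : v = rest ++ w := by
          rw [hw]
          conv_lhs => rw [← List.take_append_drop rest.length v, hmm]
        have hwlen : w.length = v.length - rest.length := by rw [hw]; simp
        have hdi' : t2.drop (i + k + (rest.length + 1)) = w := by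
          rw [← List.drop_drop, hdj, hv]
          simp
        have hrbs : pvRb ph first rest cs (t2.drop i) =
            u ++ ph :: pvRb ph first rest cs (pvSkip ph cs w) := by
          rw [huv, pvRb_append_of_not_mem _ _ _ _ _ _ hu, hv,
            show first :: (rest ++ w) = (first :: rest) ++ w by simp, pvRb_match]
        cases w with
        | nil =>
          have hge : t2.length ≤ i + k + (rest.length + 1) := by
            have := congrArg List.length hdi'
            simp at this; omega
          rw [if_neg (by rintro ⟨-, hlt, -⟩; omega)]
          rw [ih _ _ (by omega), hdi', pvRb_nil]
          rw [hrbs, show pvSkip ph cs ([] : List String) = [] by simp [pvSkip], pvRb_nil]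
          simp
        | cons y t =>
          have hlt : i + k + (rest.length + 1) < t2.length := by
            have := congrArg List.length hdi'
            simp at this; omega
          have hgety : t2[i + k + (rest.length + 1)]? = some y := by
            have h0 : (t2.drop (i + k + (rest.length + 1)))[0]? = some y := by
              rw [hdi']; rfl
            rw [List.getElem?_drop] at h0
            simpa using h0
          have hgd : t2.getD (i + k + (rest.length + 1)) "" = y := by
            rw [List.getD_eq_getElem?_getD, hgety]; rfl
          by_cases hy : cs = true ∧ y = ph
          · rw [if_pos ⟨hy.1, hlt, by rw [hgd, hy.2]⟩]
            rw [ih _ _ (by omega)]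
            have : t2.drop (i + k + (rest.length + 1) + 1) = t := by
              rw [← List.drop_drop, hdi']; rfl
            rw [this, hrbs, show pvSkip ph cs (y :: t) = t by simp [pvSkip, hy.1, hy.2]]
            simp
          · rw [if_neg (by rintro ⟨hc, -, he⟩; exact hy ⟨hc, by rw [← hgd, he]⟩)]
            rw [ih _ _ (by omega), hdi', hrbs,
              show pvSkip ph cs (y :: t) = y :: t by simp only [pvSkip, if_neg hy]]
            simp
      · have hmt : ¬ (first :: v).take (rest.length + 1) = first :: rest := by
          simp only [List.take_succ_cons]
          intro e; exact hmm (List.cons_eq_cons.mp e).2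
        rw [if_neg hmt]
        rw [ih _ _ (by omega)]
        have : t2.drop (i + k + 1) = v := by
          rw [← List.drop_drop, hdj]; rfl
        rw [this, huv, pvRb_append_of_not_mem _ _ _ _ _ _ hu, pvRb_cons,
          if_neg (by
            simp only [List.take_succ_cons]
            intro e; exact hmm (List.cons_eq_cons.mp e).2)]
        simp

-- A's loop, started just past a processed prefix p, also computes the canonical rebuild
theorem pvALoop_eq (ph first : String) (rest : List String) (cs : Bool) :
    ∀ fuel p s, s.length < fuel →
      pvALoop ph first (first :: rest) cs fuel (p ++ s) p.length =
        p ++ pvRb ph first rest cs s := by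
  intro fuel
  induction fuel with
  | zero => intro p s h; omega
  | succ f ih =>
    intro p s hs
    rw [pvALoop]
    rw [List.drop_left]
    cases hidx : PySem.List.index? s first with
    | none =>
      have : first ∉ s := (PySem.List.index?_eq_none_iff _ _).mp hidx
      rw [pvRb_of_not_mem _ _ _ _ _ this]
    | some j =>
      obtain ⟨u, v, huv, hul, hu⟩ := (PySem.List.index?_eq_some_iff _ _ _).mp hidx
      subst huv
      -- the slice at the found index
      have hdropidx : (p ++ (u ++ first :: v)).drop (p.length + j) = first :: v := by
        rw [show p ++ (u ++ first :: v) = (p ++ u) ++ (first :: v) by simp]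
        rw [show p.length + j = (p ++ u).length by simp [hul]]
        exact List.drop_left
      simp only [hdropidx]
      by_cases hm : v.take rest.length = rest
      · -- real match
        have hmt : (first :: v).take ((first :: rest).length) = first :: rest := by
          simp [hm]
        rw [if_pos hmt]
        have hrl : rest.length ≤ v.length := by
          have := congrArg List.length hm
          simp at this; omega
        obtain ⟨w, hw⟩ : ∃ w, w = v.drop rest.length := ⟨_, rfl⟩
        have hv : v = rest ++ w := by
          rw [hw]
          conv_lhs => rw [← List.take_append_drop rest.length v, hm]
        have hwlen : w.length = v.length - rest.length := by rw [hw]; simp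
        -- the spliced list
        have htake : (p ++ (u ++ first :: v)).take (p.length + j) = p ++ u := by
          rw [show p ++ (u ++ first :: v) = (p ++ u) ++ (first :: v) by simp]
          rw [show p.length + j = (p ++ u).length by simp [hul]]
          exact List.take_left
        have hdrop2 : (p ++ (u ++ first :: v)).drop (p.length + j + (first :: rest).length) = w := by
          rw [show p ++ (u ++ first :: v) = ((p ++ u) ++ (first :: rest)) ++ w by
            rw [hv]; simp]
          rw [show p.length + j + (first :: rest).length = ((p ++ u) ++ (first :: rest)).length by
            simp [hul]; all_goals omega]
          exact List.drop_left
        rw [htake, hdrop2]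
        have hslen : (u ++ first :: v).length = u.length + 1 + v.length := by simp; omega
        have hgoalr : p ++ pvRb ph first rest cs (u ++ first :: v) =
            (p ++ u) ++ (ph :: pvRb ph first rest cs (pvSkip ph cs w)) := by
          rw [pvRb_append_of_not_mem _ _ _ _ _ _ hu]
          conv_lhs => rw [hv]
          rw [show first :: (rest ++ w) = (first :: rest) ++ w by simp, pvRb_match]
          simp
        cases cs with
        | false =>
          rw [if_neg (by simp)]
          rw [show p ++ u ++ ph :: w = (p ++ u ++ [ph]) ++ w by simp]
          rw [show p.length + j + 1 = (p ++ u ++ [ph]).length by simp [hul]; all_goals omega]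
          rw [ih _ _ (by rw [hslen] at hs; omega)]
          rw [hgoalr, pvSkip_false]
          simp
        | true =>
          rw [if_pos rfl]
          have hget : (p ++ u ++ ph :: w)[p.length + j + 1]? = w[0]? := by
            rw [show p ++ u ++ ph :: w = (p ++ u ++ [ph]) ++ w by simp]
            rw [show p.length + j + 1 = (p ++ u ++ [ph]).length + 0 by simp [hul]; all_goals omega]
            rw [List.getElem?_append_right (by omega)]
            simp
          rw [hget]
          cases w with
          | nil =>
            simp only [List.getElem?_nil]
            rw [hgoalr]
            rw [show pvSkip ph true ([] : List String) = [] by simp [pvSkip]]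
            simp [pvRb_nil]
          | cons y t =>
            simp only [List.getElem?_cons_zero]
            by_cases hy : y = ph
            · rw [if_pos hy]
              have he1 : (p ++ u ++ ph :: y :: t).take (p.length + j + 1) ++
                  (p ++ u ++ ph :: y :: t).drop (p.length + j + 2) = (p ++ u ++ [ph]) ++ t := by
                rw [show p ++ u ++ ph :: y :: t = (p ++ u ++ [ph]) ++ (y :: t) by simp]
                rw [show p.length + j + 1 = (p ++ u ++ [ph]).length by simp [hul]; all_goals omega]
                rw [List.take_left]
                rw [show p.length + j + 2 = (p ++ u ++ [ph]).length + 1 by simp [hul]; all_goals omega]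
                rw [List.drop_append]
                simp
              rw [he1]
              rw [show p.length + j + 1 = (p ++ u ++ [ph]).length by simp [hul]; all_goals omega]
              rw [ih _ _ (by
                have h1 : t.length + 1 = v.length - rest.length := by
                  have h0 : (y :: t).length = (v.drop rest.length).length := congrArg List.length hw
                  simp only [List.length_cons, List.length_drop] at h0
                  exact h0
                have h2 : u.length + 1 + v.length < f + 1 := hslen ▸ hs
                omega)]
              rw [hgoalr]
              rw [show pvSkip ph true (y :: t) = t by simp [pvSkip, hy]]
              simp
            · rw [if_neg hy]
              rw [show p ++ u ++ ph :: y :: t = (p ++ u ++ [ph]) ++ (y :: t) by simp]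
              rw [show p.length + j + 1 = (p ++ u ++ [ph]).length by simp [hul]; all_goals omega]
              rw [ih _ _ (by
                have h1 : t.length + 1 = v.length - rest.length := by
                  have h0 : (y :: t).length = (v.drop rest.length).length := congrArg List.length hw
                  simp only [List.length_cons, List.length_drop] at h0
                  exact h0
                have h2 : u.length + 1 + v.length < f + 1 := hslen ▸ hs
                omega)]
              rw [hgoalr]
              rw [show pvSkip ph true (y :: t) = y :: t by simp [pvSkip, hy]]
              simp
      · -- first found but slice mismatch
        have hmt : ¬ (first :: v).take ((first :: rest).length) = first :: rest := by
          simp only [List.length_cons, List.take_succ_cons]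
          intro e; exact hm (List.cons_eq_cons.mp e).2
        rw [if_neg hmt]
        rw [show p ++ (u ++ first :: v) = (p ++ u ++ [first]) ++ v by simp]
        rw [show p.length + j + 1 = (p ++ u ++ [first]).length by simp [hul]; all_goals omega]
        have hvlen : v.length < f := by
          have h := hs
          rw [List.length_append, List.length_cons] at h
          omega
        rw [ih _ _ hvlen]
        rw [pvRb_append_of_not_mem _ _ _ _ _ _ hu, pvRb_cons, if_neg (by
          simp only [List.take_succ_cons]
          intro e; exact hm (List.cons_eq_cons.mp e).2)]
        simp

theorem pv_fold_eq (cs : Bool) :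
    ∀ (ngs : List (String × List String)) (text : List String), (∀ p ∈ ngs, p.2 ≠ []) →
      ngs.foldl (fun t2 pn => match pn.2 with
        | [] => t2
        | first :: _ => pvALoop pn.1 first pn.2 cs (t2.length + 1) t2 0) text =
      ngs.foldl (fun t2 pn => match pn.2 with
        | [] => t2
        | first :: rest => pvBLoop pn.1 first rest cs t2 t2.length 0 []) text := by
  intro ngs
  induction ngs with
  | nil => intro text _; rfl
  | cons pn rest ih =>
    intro text hpre
    have hne := hpre pn List.mem_cons_self
    obtain ⟨ph, ng⟩ := pn
    cases ng with
    | nil => exact absurd rfl hne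
    | cons f r =>
      simp only [List.foldl_cons]
      have hA : pvALoop ph f (f :: r) cs (text.length + 1) text 0 =
          pvRb ph f r cs text := by
        have := pvALoop_eq ph f r cs (text.length + 1) [] text (by omega)
        simpa using this
      have hB : pvBLoop ph f r cs text text.length 0 [] = pvRb ph f r cs text := by
        have := pvBLoop_eq ph f r cs text text.length 0 [] (by omega)
        simpa using this
      rw [hA, hB]
      exact ih _ (fun p hp => hpre p (List.mem_cons_of_mem _ hp))

-- ===== VERDICT (by name: the statement is the Claim_ definition above) =====
theorem replace_ngram_spec : Claim_equal_replace_ngram := by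
  intro text n_grams cs _ hpre
  unfold Spec_replace_ngram replace_ngram replace_ngram_alt
  exact pv_fold_eq cs n_grams text hpre
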